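-- pv_equiv track=rewrite | github.com/Cracket90/Advent-of-Code | 2024/program_day2.py | control_safe
-- ===== SOURCE A (Python) =====
-- def control_safe(report: list[int], max_distance: int) -> bool:
--     num_el = len(report)
--     first_el = report[0]
--     last_el = report[-1]
--     safe_report = True
--     if first_el == last_el: return False
--     elif report[0] > report[-1]:
--         for i in range(num_el-1):
--             distance = report[i]-report[i+1]
--             if distance <= 0 or distance > max_distance: return False
--     else:
--         for i in range(num_el-1):
--             distance = report[i+1]-report[i]
--             if distance <= 0 or distance > max_distance: return False
--     return safe_report
-- ===== SOURCE B (Python) =====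
-- def control_safe(report: list[int], max_distance: int) -> bool:
--     if report[0] == report[-1]:
--         return False
--     diffs = [b - a for a, b in zip(report, report[1:])]
--     inc = all(0 < d <= max_distance for d in diffs)
--     dec = all(0 < -d <= max_distance for d in diffs)
--     return inc or dec
-- ===== Notes on version B (the rewrite author's own statement) =====
-- stated objective: simpler
-- what changed: B drops A's endpoint-directed branch and index loops: it builds the adjacent-difference list once and returns whether it is entirely an increasing step sequence or entirely a decreasing one (inc or dec), which coincides with A's directed check because an all-positive (all-negative) diff list forces first<last (first>last).
import Mathlib
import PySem

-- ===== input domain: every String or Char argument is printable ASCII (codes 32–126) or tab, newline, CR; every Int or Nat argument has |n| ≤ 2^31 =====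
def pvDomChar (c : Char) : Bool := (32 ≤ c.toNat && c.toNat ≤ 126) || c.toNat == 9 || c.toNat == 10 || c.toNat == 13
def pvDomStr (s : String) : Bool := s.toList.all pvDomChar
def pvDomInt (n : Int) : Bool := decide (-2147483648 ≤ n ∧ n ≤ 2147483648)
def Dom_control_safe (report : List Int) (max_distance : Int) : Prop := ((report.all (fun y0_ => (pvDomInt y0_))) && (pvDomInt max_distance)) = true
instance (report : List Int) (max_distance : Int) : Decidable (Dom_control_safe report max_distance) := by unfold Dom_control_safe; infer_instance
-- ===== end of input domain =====

-- B replaces A's endpoint-directed branch and two index loops by one adjacent-difference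
-- list checked against both monotone hypotheses (inc or dec); objective: simpler.

-- ===== PORT A =====
-- A's first loop: for i in range(num_el-1): distance = report[i]-report[i+1]; early return False
def ctrlLoopDec (report : List Int) (max_distance : Int) : List Int → Bool
  | [] => true
  | i :: rest =>
    let distance := PySem.List.pyGetD report i 0 - PySem.List.pyGetD report (i + 1) 0
    if distance ≤ 0 ∨ distance > max_distance then false
    else ctrlLoopDec report max_distance rest

-- A's second loop: distance = report[i+1]-report[i]
def ctrlLoopInc (report : List Int) (max_distance : Int) : List Int → Bool
  | [] => true
  | i :: rest =>
    let distance := PySem.List.pyGetD report (i + 1) 0 - PySem.List.pyGetD report i 0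
    if distance ≤ 0 ∨ distance > max_distance then false
    else ctrlLoopInc report max_distance rest

def control_safe (report : List Int) (max_distance : Int) : Bool :=
  let num_el : Int := report.length
  match PySem.List.pyGet? report 0, PySem.List.pyGet? report (-1) with
  | some first_el, some last_el =>
    if first_el == last_el then false
    else if first_el > last_el then
      ctrlLoopDec report max_distance (PySem.List.pyRange 0 (num_el - 1) 1)
    else
      ctrlLoopInc report max_distance (PySem.List.pyRange 0 (num_el - 1) 1)
  | _, _ => false  -- IndexError in Python: outside Pre_

-- ===== PORT B =====
def control_safe_alt (report : List Int) (max_distance : Int) : Bool :=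
  match PySem.List.pyGet? report 0 with
  | none => false  -- IndexError in Python: outside Pre_
  | some f =>
    match PySem.List.pyGet? report (-1) with
    | none => false
    | some l =>
      if f == l then false
      else
        -- diffs = [b - a for a, b in zip(report, report[1:])]   (report[1:] = drop 1, exact: start ≥ 0)
        let diffs := (report.zip (report.drop 1)).map (fun p => p.2 - p.1)
        let inc := diffs.all (fun d => decide (0 < d) && decide (d ≤ max_distance))
        let dec := diffs.all (fun d => decide (0 < -d) && decide (-d ≤ max_distance))
        inc || dec

-- ===== PRECONDITION & SPEC =====
-- A raises IndexError on the empty list; everywhere else it returns.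
def Pre_control_safe (report : List Int) (max_distance : Int) : Prop := report ≠ []
instance (report : List Int) (max_distance : Int) : Decidable (Pre_control_safe report max_distance) := by unfold Pre_control_safe; infer_instance
def pvWitness_control_safe : List Int × Int := ([1, 3, 4], 3)

def Spec_control_safe (report : List Int) (max_distance : Int) (out : Bool) : Prop := out = control_safe_alt report max_distance
instance (report : List Int) (max_distance : Int) (out : Bool) : Decidable (Spec_control_safe report max_distance out) := by unfold Spec_control_safe; infer_instance

-- ===== CLAIM (what is proved, stated in full; the proofs are below) =====
def Claim_equal_control_safe : Prop := ∀ (report : List Int) (max_distance : Int), Dom_control_safe report max_distance → Pre_control_safe report max_distance → Spec_control_safe report max_distance (control_safe report max_distance)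

-- ===== LEMMAS AND PROOFS =====

-- adjacent-pair chains, used to characterise both programs
def chainI (m : Int) : List Int → Bool
  | a :: b :: rest => (decide (0 < b - a) && decide (b - a ≤ m)) && chainI m (b :: rest)
  | _ => true

def chainD (m : Int) : List Int → Bool
  | a :: b :: rest => (decide (0 < a - b) && decide (a - b ≤ m)) && chainD m (b :: rest)
  | _ => true

lemma diffs_all_inc (m : Int) (xs : List Int) :
    ((xs.zip (xs.drop 1)).map (fun p => p.2 - p.1)).all
      (fun d => decide (0 < d) && decide (d ≤ m)) = chainI m xs := by
  induction xs with
  | nil => simp [chainI]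
  | cons a tl ih =>
    cases tl with
    | nil => simp [chainI]
    | cons b rest => simp only [List.drop_succ_cons, List.drop_zero, List.zip_cons_cons,
        List.map_cons, List.all_cons, chainI] at ih ⊢; rw [← ih]

lemma diffs_all_dec (m : Int) (xs : List Int) :
    ((xs.zip (xs.drop 1)).map (fun p => p.2 - p.1)).all
      (fun d => decide (0 < -d) && decide (-d ≤ m)) = chainD m xs := by
  induction xs with
  | nil => simp [chainD]
  | cons a tl ih =>
    cases tl with
    | nil => simp [chainD]
    | cons b rest =>
      simp only [List.drop_succ_cons, List.drop_zero, List.zip_cons_cons,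
        List.map_cons, List.all_cons, chainD] at ih ⊢
      rw [← ih]
      have h1 : decide (0 < -(b - a)) = decide (0 < a - b) := by
        apply decide_eq_decide.mpr; omega
      have h2 : decide (-(b - a) ≤ m) = decide (a - b ≤ m) := by
        apply decide_eq_decide.mpr; omega
      rw [h1, h2]

lemma chain_short (m : Int) (xs : List Int) (h : xs.length ≤ 1) :
    chainI m xs = true ∧ chainD m xs = true := by
  match xs, h with
  | [], _ => exact ⟨rfl, rfl⟩
  | [a], _ => exact ⟨rfl, rfl⟩

lemma loopInc_eq_chain (m : Int) (xs : List Int) (n : Nat) :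
    ∀ j : Nat, xs.length - 1 - j = n →
      ctrlLoopInc xs m (PySem.List.pyRange j ((xs.length : Int) - 1) 1) = chainI m (xs.drop j) := by
  induction n with
  | zero =>
    intro j hj
    rw [PySem.List.pyRange_one_eq_nil (by omega)]
    have hlen : (xs.drop j).length ≤ 1 := by simp; omega
    exact ((chain_short m _ hlen).1).symm
  | succ n ih =>
    intro j hj
    have hj1 : j + 1 < xs.length := by omega
    have hjlt : j < xs.length := by omega
    rw [PySem.List.pyRange_one_cons (by omega)]
    have hcast : (j : Int) + 1 = ((j + 1 : Nat) : Int) := by push_cast; ring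
    rw [List.drop_eq_getElem_cons hjlt, List.drop_eq_getElem_cons hj1]
    show (if _ then false else ctrlLoopInc xs m (PySem.List.pyRange ((j:Int)+1) ((xs.length : Int) - 1) 1)) = _
    rw [hcast, ih (j+1) (by omega)]
    rw [List.drop_eq_getElem_cons hj1]
    simp only [PySem.List.pyGetD_natCast, List.getD_eq_getElem?_getD,
      List.getElem?_eq_getElem hjlt, List.getElem?_eq_getElem hj1, Option.getD_some]
    by_cases hc : xs[j+1] - xs[j] ≤ 0 ∨ xs[j+1] - xs[j] > m
    · rw [if_pos hc]
      show false = chainI m (xs[j] :: xs[j+1] :: xs.drop (j+2))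
      simp only [chainI]
      have : ¬ (decide (0 < xs[j+1] - xs[j]) && decide (xs[j+1] - xs[j] ≤ m)) = true := by
        simp; omega
      cases hb : (decide (0 < xs[j+1] - xs[j]) && decide (xs[j+1] - xs[j] ≤ m)) with
      | false => simp
      | true => exact absurd hb this
    · rw [if_neg hc]
      show chainI m (xs[j+1] :: xs.drop (j+2)) = chainI m (xs[j] :: xs[j+1] :: xs.drop (j+2))
      simp only [chainI]
      have : (decide (0 < xs[j+1] - xs[j]) && decide (xs[j+1] - xs[j] ≤ m)) = true := by
        simp; omega
      rw [this, Bool.true_and]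

lemma loopDec_eq_chain (m : Int) (xs : List Int) (n : Nat) :
    ∀ j : Nat, xs.length - 1 - j = n →
      ctrlLoopDec xs m (PySem.List.pyRange j ((xs.length : Int) - 1) 1) = chainD m (xs.drop j) := by
  induction n with
  | zero =>
    intro j hj
    rw [PySem.List.pyRange_one_eq_nil (by omega)]
    have hlen : (xs.drop j).length ≤ 1 := by simp; omega
    exact ((chain_short m _ hlen).2).symm
  | succ n ih =>
    intro j hj
    have hj1 : j + 1 < xs.length := by omega
    have hjlt : j < xs.length := by omega
    rw [PySem.List.pyRange_one_cons (by omega)]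
    have hcast : (j : Int) + 1 = ((j + 1 : Nat) : Int) := by push_cast; ring
    rw [List.drop_eq_getElem_cons hjlt, List.drop_eq_getElem_cons hj1]
    show (if _ then false else ctrlLoopDec xs m (PySem.List.pyRange ((j:Int)+1) ((xs.length : Int) - 1) 1)) = _
    rw [hcast, ih (j+1) (by omega)]
    rw [List.drop_eq_getElem_cons hj1]
    simp only [PySem.List.pyGetD_natCast, List.getD_eq_getElem?_getD,
      List.getElem?_eq_getElem hjlt, List.getElem?_eq_getElem hj1, Option.getD_some]
    by_cases hc : xs[j] - xs[j+1] ≤ 0 ∨ xs[j] - xs[j+1] > m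
    · rw [if_pos hc]
      show false = chainD m (xs[j] :: xs[j+1] :: xs.drop (j+2))
      simp only [chainD]
      have : (decide (0 < xs[j] - xs[j+1]) && decide (xs[j] - xs[j+1] ≤ m)) = false := by
        simp; omega
      rw [this, Bool.false_and]
    · rw [if_neg hc]
      show chainD m (xs[j+1] :: xs.drop (j+2)) = chainD m (xs[j] :: xs[j+1] :: xs.drop (j+2))
      simp only [chainD]
      have : (decide (0 < xs[j] - xs[j+1]) && decide (xs[j] - xs[j+1] ≤ m)) = true := by
        simp; omega
      rw [this, Bool.true_and]

lemma chainI_head_le_last (m : Int) : ∀ (xs : List Int) (a : Int),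
    chainI m (a :: xs) = true → a ≤ (a :: xs).getLast (by simp) := by
  intro xs
  induction xs with
  | nil => intro a _; simp
  | cons b rest ih =>
    intro a h
    simp only [chainI, Bool.and_eq_true, decide_eq_true_eq] at h
    have h2 := ih b (by simpa [chainI] using h.2)
    rw [List.getLast_cons (by simp)]
    omega

lemma chainD_last_le_head (m : Int) : ∀ (xs : List Int) (a : Int),
    chainD m (a :: xs) = true → (a :: xs).getLast (by simp) ≤ a := by
  intro xs
  induction xs with
  | nil => intro a _; simp
  | cons b rest ih =>
    intro a h
    simp only [chainD, Bool.and_eq_true, decide_eq_true_eq] at h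
    have h2 := ih b (by simpa [chainD] using h.2)
    rw [List.getLast_cons (by simp)]
    omega

-- ===== VERDICT (by name: the statement is the Claim_ definition above) =====
theorem control_safe_spec : Claim_equal_control_safe := by
  intro report m _hdom hpre
  unfold Spec_control_safe control_safe control_safe_alt
  match hrep : report with
  | [] => exact absurd rfl hpre
  | x :: rest =>
    have hne : x :: rest ≠ ([] : List Int) := by simp
    have h0 : PySem.List.pyGet? (x :: rest) 0 = some x := by
      rw [PySem.List.pyGet?_zero]; simp
    have hL : PySem.List.pyGet? (x :: rest) (-1) = some ((x :: rest).getLast hne) := by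
      rw [PySem.List.pyGet?_neg_one, List.getLast?_eq_some_getLast hne]
    rw [h0, hL]
    set L := (x :: rest).getLast hne with hLdef
    simp only
    by_cases heq : x = L
    · simp [heq]
    · have hbeq : (x == L) = false := beq_eq_false_iff_ne.mpr heq
      rw [hbeq, if_neg Bool.false_ne_true, if_neg Bool.false_ne_true]
      have hA_inc := loopInc_eq_chain m (x :: rest) ((x :: rest).length - 1 - 0) 0 rfl
      have hA_dec := loopDec_eq_chain m (x :: rest) ((x :: rest).length - 1 - 0) 0 rfl
      simp only [List.drop_zero, Nat.cast_zero] at hA_inc hA_dec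
      rw [diffs_all_inc, diffs_all_dec]
      by_cases hgt : x > L
      · rw [if_pos hgt, hA_dec]
        have hIfalse : chainI m (x :: rest) = false := by
          cases hI : chainI m (x :: rest) with
          | false => rfl
          | true =>
            have := chainI_head_le_last m rest x hI
            rw [← hLdef] at this; omega
        rw [hIfalse, Bool.false_or]
      · rw [if_neg hgt, hA_inc]
        have hlt : x < L := by omega
        have hDfalse : chainD m (x :: rest) = false := by
          cases hD : chainD m (x :: rest) with
          | false => rfl
          | true =>
            have := chainD_last_le_head m rest x hD
            rw [← hLdef] at this; omega
        rw [hDfalse, Bool.or_false]
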